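-- pv_equiv track=rewrite | github.com/MohamedIKenedy/Pattern-mining-toolkit | pattern-mining-toolkit/src/pattern_mining_toolkit.py | _generate_sequential_candidates
-- ===== SOURCE A (Python) =====
-- from typing import List, Set, Dict, Tuple
--
-- def _generate_sequential_candidates(sequences: List[tuple], k: int) -> List[tuple]:
--     """Helper method to generate candidate k-sequences"""
--     candidates = []
--     for seq1 in sequences:
--         for seq2 in sequences:
--             if seq1[1:] == seq2[:-1] and seq1 != seq2:
--                 candidate = seq1 + (seq2[-1],)
--                 if len(candidate) == k:
--                     candidates.append(candidate)
--     return candidates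
-- ===== SOURCE B (Python) =====
-- def _generate_sequential_candidates(sequences, k):
--     """Generate candidate k-sequences by hash-indexing sequences on their prefix."""
--     index = {}
--     for s in sequences:
--         index.setdefault(s[:-1], []).append(s)
--     out = []
--     for s1 in sequences:
--         if len(s1) + 1 == k:
--             for s2 in index.get(s1[1:], []):
--                 if s2 != s1:
--                     out.append(s1 + (s2[-1],))
--     return out
-- ===== Notes on version B (the rewrite author's own statement) =====
-- stated objective: faster
-- what changed: B replaces A's all-pairs double loop by a single pass that hash-indexes every sequence under its prefix seq[:-1] and then, for each seq1, looks up exactly the sequences whose prefix equals seq1[1:], preserving A's output order.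
-- outside the precondition, e.g. on _generate_sequential_candidates([(), (5,)], 3): A raises IndexError, B returns []
-- crash fix: On inputs containing both the empty tuple and a 1-tuple A raises IndexError (seq2=() passes the join test and ()[-1] fails); when k != 2 B's length test skips that join and B returns the candidate list normally. — e.g. on _generate_sequential_candidates([[], [5]], 3): A raises IndexError, B returns []
import Mathlib
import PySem

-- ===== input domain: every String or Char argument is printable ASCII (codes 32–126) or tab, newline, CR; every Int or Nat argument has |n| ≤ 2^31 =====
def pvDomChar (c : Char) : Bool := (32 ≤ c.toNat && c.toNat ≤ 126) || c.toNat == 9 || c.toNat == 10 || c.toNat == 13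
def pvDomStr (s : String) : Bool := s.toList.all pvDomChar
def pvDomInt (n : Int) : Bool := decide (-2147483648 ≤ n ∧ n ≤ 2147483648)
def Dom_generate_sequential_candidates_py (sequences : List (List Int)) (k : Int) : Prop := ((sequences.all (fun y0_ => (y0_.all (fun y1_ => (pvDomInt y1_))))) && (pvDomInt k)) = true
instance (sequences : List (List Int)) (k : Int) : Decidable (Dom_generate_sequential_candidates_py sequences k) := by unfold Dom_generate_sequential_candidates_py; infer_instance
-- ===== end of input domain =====

-- B replaces A's quadratic double loop by a dictionary indexing each sequence under its
-- prefix seq[:-1], so each seq1 looks up its matches directly (objective: faster, asymptotic).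

-- ===== PORT A =====
def generate_sequential_candidates_py (sequences : List (List Int)) (k : Int) : List (List Int) :=
  sequences.foldl (fun candidates seq1 =>
    sequences.foldl (fun candidates seq2 =>
      if PySem.List.slice seq1 (some 1) none = PySem.List.slice seq2 none (some (-1)) ∧ seq1 ≠ seq2 then
        let candidate := seq1 ++ [PySem.List.pyGetD seq2 (-1) 0]
        if (candidate.length : Int) = k then candidates ++ [candidate] else candidates
      else candidates) candidates) []

-- ===== PORT B =====
def generate_sequential_candidates_py_alt (sequences : List (List Int)) (k : Int) : List (List Int) :=
  let index : PySem.Dict (List Int) (List (List Int)) :=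
    sequences.foldl (fun d s => d.modify (PySem.List.slice s none (some (-1))) [] (· ++ [s])) PySem.Dict.empty
  sequences.foldl (fun out s1 =>
    if (s1.length : Int) + 1 = k then
      (index.getD (PySem.List.slice s1 (some 1) none) []).foldl (fun out s2 =>
        if s2 ≠ s1 then out ++ [s1 ++ [PySem.List.pyGetD s2 (-1) 0]] else out) out
    else out) []

-- ===== PRECONDITION & SPEC =====
-- Pre_ excludes exactly the inputs on which Python A raises (IndexError on ()[-1]): those
-- containing both the empty tuple and a 1-tuple, where seq2 = () passes the join condition.
def Pre_generate_sequential_candidates_py (sequences : List (List Int)) (k : Int) : Prop :=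
  ¬ (([] : List Int) ∈ sequences ∧ ∃ s ∈ sequences, s ≠ [] ∧ s.tail = [])
instance (sequences : List (List Int)) (k : Int) : Decidable (Pre_generate_sequential_candidates_py sequences k) := by unfold Pre_generate_sequential_candidates_py; infer_instance
def pvWitness_generate_sequential_candidates_py : List (List Int) × Int := ([[1, 2], [2, 3]], 3)

-- A raises IndexError on inputs containing both () and a 1-tuple; when k ≠ 2, B skips the
-- offending join (its length test comes first) and returns the candidate list normally.
def Raises_generate_sequential_candidates_py (sequences : List (List Int)) (k : Int) : Prop :=
  (([] : List Int) ∈ sequences ∧ ∃ s ∈ sequences, s ≠ [] ∧ s.tail = []) ∧ k ≠ 2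
instance (sequences : List (List Int)) (k : Int) : Decidable (Raises_generate_sequential_candidates_py sequences k) := by unfold Raises_generate_sequential_candidates_py; infer_instance
def pvRaiseWitness_generate_sequential_candidates_py : List (List Int) × Int := ([[], [5]], 3)
def pvRaiseWitnessOut_generate_sequential_candidates_py : List (List Int) := []

def Spec_generate_sequential_candidates_py (sequences : List (List Int)) (k : Int) (out : List (List Int)) : Prop := out = generate_sequential_candidates_py_alt sequences k
instance (sequences : List (List Int)) (k : Int) (out : List (List Int)) : Decidable (Spec_generate_sequential_candidates_py sequences k out) := by unfold Spec_generate_sequential_candidates_py; infer_instance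

-- ===== CLAIM (what is proved, stated in full; the proofs are below) =====
def Claim_equal_generate_sequential_candidates_py : Prop := ∀ (sequences : List (List Int)) (k : Int), Dom_generate_sequential_candidates_py sequences k → Pre_generate_sequential_candidates_py sequences k → Spec_generate_sequential_candidates_py sequences k (generate_sequential_candidates_py sequences k)

def Claim_raises_generate_sequential_candidates_py : Prop := (∀ (sequences : List (List Int)) (k : Int), Dom_generate_sequential_candidates_py sequences k → Raises_generate_sequential_candidates_py sequences k → ¬ Pre_generate_sequential_candidates_py sequences k) ∧ (Dom_generate_sequential_candidates_py (pvRaiseWitness_generate_sequential_candidates_py.1) (pvRaiseWitness_generate_sequential_candidates_py.2) ∧ Raises_generate_sequential_candidates_py (pvRaiseWitness_generate_sequential_candidates_py.1) (pvRaiseWitness_generate_sequential_candidates_py.2) ∧ generate_sequential_candidates_py_alt (pvRaiseWitness_generate_sequential_candidates_py.1) (pvRaiseWitness_generate_sequential_candidates_py.2) = pvRaiseWitnessOut_generate_sequential_candidates_py)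

-- ===== LEMMAS AND PROOFS =====

-- the joined candidates contributed by one seq1 (both programs produce exactly this block)
def pvF (sequences : List (List Int)) (k : Int) (s1 : List Int) : List (List Int) :=
  (sequences.filter (fun s2 => decide (PySem.List.slice s1 (some 1) none = PySem.List.slice s2 none (some (-1)) ∧ s1 ≠ s2 ∧ (s1.length : Int) + 1 = k))).map
    (fun s2 => s1 ++ [PySem.List.pyGetD s2 (-1) 0])

-- A's inner loop over seq2 appends exactly the pvF block of seq1
theorem pvA_inner (l : List (List Int)) (k : Int) (s1 : List Int) (acc : List (List Int)) :
    (l.foldl (fun candidates seq2 =>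
      if PySem.List.slice s1 (some 1) none = PySem.List.slice seq2 none (some (-1)) ∧ s1 ≠ seq2 then
        let candidate := s1 ++ [PySem.List.pyGetD seq2 (-1) 0]
        if (candidate.length : Int) = k then candidates ++ [candidate] else candidates
      else candidates) acc) = acc ++ pvF l k s1 := by
  have h := PySem.List.foldl_append_if
    (fun s2 => decide (PySem.List.slice s1 (some 1) none = PySem.List.slice s2 none (some (-1)) ∧ s1 ≠ s2 ∧ (s1.length : Int) + 1 = k))
    (fun s2 => s1 ++ [PySem.List.pyGetD s2 (-1) 0]) (l := l) (acc := acc)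
  rw [pvF, ← h]
  apply PySem.List.foldl_congr_mem
  intro acc2 s2 _
  by_cases h1 : PySem.List.slice s1 (some 1) none = PySem.List.slice s2 none (some (-1)) <;>
    by_cases h2 : s1 ≠ s2 <;> by_cases h3 : (s1.length : Int) + 1 = k <;>
    simp_all [List.length_append]

theorem pvA_eq (sequences : List (List Int)) (k : Int) :
    generate_sequential_candidates_py sequences k = sequences.flatMap (pvF sequences k) := by
  unfold generate_sequential_candidates_py
  have h := PySem.List.foldl_congr_mem (l := sequences) (init := ([] : List (List Int)))
    (g := fun acc s1 => acc ++ pvF sequences k s1)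
    (f := fun candidates seq1 => sequences.foldl (fun candidates seq2 =>
      if PySem.List.slice seq1 (some 1) none = PySem.List.slice seq2 none (some (-1)) ∧ seq1 ≠ seq2 then
        let candidate := seq1 ++ [PySem.List.pyGetD seq2 (-1) 0]
        if (candidate.length : Int) = k then candidates ++ [candidate] else candidates
      else candidates) candidates)
    (fun acc s1 _ => pvA_inner sequences k s1 acc)
  rw [h, PySem.List.foldl_append_eq_flatMap]
  simp

-- B's prefix index, looked up at a key, returns exactly the sequences whose prefix is that key
theorem pvB_index (sequences : List (List Int)) (key : List Int) :
    ((sequences.foldl (fun d s => d.modify (PySem.List.slice s none (some (-1))) [] (· ++ [s])) PySem.Dict.empty).getD key [])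
      = sequences.filter (fun s => PySem.List.slice s none (some (-1)) == key) := by
  have hmap : sequences.foldl (fun d s => d.modify (PySem.List.slice s none (some (-1))) [] (· ++ [s])) PySem.Dict.empty
      = (sequences.map (fun s => (PySem.List.slice s none (some (-1)), s))).foldl
          (fun d p => d.modify p.1 [] (· ++ [p.2])) PySem.Dict.empty := by
    rw [List.foldl_map]
  rw [hmap, PySem.Dict.getD_foldl_modify_append, List.filter_map, List.map_map]
  simp [Function.comp_def]

-- B's step for one s1 appends exactly the pvF block of s1
set_option maxRecDepth 4096 in
theorem pvB_inner (sequences : List (List Int)) (k : Int) (s1 : List Int) (acc : List (List Int)) :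
    (if (s1.length : Int) + 1 = k then
      (((sequences.foldl (fun d s => d.modify (PySem.List.slice s none (some (-1))) [] (· ++ [s])) PySem.Dict.empty).getD (PySem.List.slice s1 (some 1) none) []).foldl
        (fun out s2 => if s2 ≠ s1 then out ++ [s1 ++ [PySem.List.pyGetD s2 (-1) 0]] else out) acc)
    else acc) = acc ++ pvF sequences k s1 := by
  by_cases hk : (s1.length : Int) + 1 = k
  · rw [if_pos hk, pvB_index]
    have h := PySem.List.foldl_append_if (fun s2 => decide (s2 ≠ s1))
      (fun s2 => s1 ++ [PySem.List.pyGetD s2 (-1) 0])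
      (l := sequences.filter (fun s => PySem.List.slice s none (some (-1)) == PySem.List.slice s1 (some 1) none)) (acc := acc)
    have hbody : ((sequences.filter (fun s => PySem.List.slice s none (some (-1)) == PySem.List.slice s1 (some 1) none)).foldl
        (fun out s2 => if s2 ≠ s1 then out ++ [s1 ++ [PySem.List.pyGetD s2 (-1) 0]] else out) acc)
        = ((sequences.filter (fun s => PySem.List.slice s none (some (-1)) == PySem.List.slice s1 (some 1) none)).foldl
        (fun out s2 => if decide (s2 ≠ s1) = true then out ++ [s1 ++ [PySem.List.pyGetD s2 (-1) 0]] else out) acc) := by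
      apply PySem.List.foldl_congr_mem; intro a s2 _; simp
    rw [hbody, h, List.filter_filter, pvF]
    congr 1
    apply congrArg
    apply List.filter_congr
    intro s2 _
    by_cases h1 : PySem.List.slice s1 (some 1) none = PySem.List.slice s2 none (some (-1))
    · by_cases h2 : s1 = s2
      · simp [h2]
      · simp [← h1, h2, hk, Ne]
        exact fun h => h2 h.symm
    · have h1' : ¬ PySem.List.slice s2 none (some (-1)) = PySem.List.slice s1 (some 1) none :=
        fun h => h1 h.symm
      simp [h1, h1']
  · rw [if_neg hk, pvF]
    have : (sequences.filter (fun s2 => decide (PySem.List.slice s1 (some 1) none = PySem.List.slice s2 none (some (-1)) ∧ s1 ≠ s2 ∧ (s1.length : Int) + 1 = k))) = [] := by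
      apply List.filter_eq_nil_iff.mpr
      intro s2 _
      simp only [decide_eq_true_eq, not_and]
      intro _ _
      exact hk
    rw [this]
    simp

theorem pvB_eq (sequences : List (List Int)) (k : Int) :
    generate_sequential_candidates_py_alt sequences k = sequences.flatMap (pvF sequences k) := by
  unfold generate_sequential_candidates_py_alt
  have h := PySem.List.foldl_congr_mem (l := sequences) (init := ([] : List (List Int)))
    (g := fun acc s1 => acc ++ pvF sequences k s1)
    (f := fun out s1 =>
      if (s1.length : Int) + 1 = k then
        (((sequences.foldl (fun d s => d.modify (PySem.List.slice s none (some (-1))) [] (· ++ [s])) PySem.Dict.empty).getD (PySem.List.slice s1 (some 1) none) []).foldl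
          (fun out s2 => if s2 ≠ s1 then out ++ [s1 ++ [PySem.List.pyGetD s2 (-1) 0]] else out) out)
      else out)
    (fun acc s1 _ => pvB_inner sequences k s1 acc)
  rw [h, PySem.List.foldl_append_eq_flatMap]
  simp

-- ===== VERDICT (by name: the statement is the Claim_ definition above) =====
theorem generate_sequential_candidates_py_spec : Claim_equal_generate_sequential_candidates_py := by
  intro sequences k _ _
  unfold Spec_generate_sequential_candidates_py
  rw [pvA_eq, pvB_eq]

@[simp]
theorem generate_sequential_candidates_py_raises : Claim_raises_generate_sequential_candidates_py := by
  unfold Claim_raises_generate_sequential_candidates_py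
  exact ⟨fun s k _ hr hp => hp hr.1, by decide⟩
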